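-- pv_equiv track=rewrite | github.com/KevinOLR/Prueba_SoyCalidad | ejercicio1.py | conteo_de_elementos
-- ===== SOURCE A (Python) =====
-- def conteo_de_elementos(matriz):
--     vistos = []
--     repetidos = []
--     #Recorre la matriz y actualiza las listas de vistos y repetidos
--     for fila in matriz:
--         for num in fila:
--             if num in vistos:
--                 if num not in repetidos:
--                     repetidos.append(num)
--             else:
--                 vistos.append(num)
--     #Calcula el número de elementos únicos (vistos una vez)
--     una_vez = len([num for num in vistos if num not in repetidos])
--
--     #Calcula el número de elementos repetidos
--     conteo_repetidos = len(repetidos)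
--
--     #Retorna el arreglo con los dos valores
--     return [una_vez, conteo_repetidos]
-- ===== SOURCE B (Python) =====
-- def conteo_de_elementos(matriz):
--     # Phase 1: build a complete frequency table of all elements.
--     conteo = {}
--     for fila in matriz:
--         for num in fila:
--             conteo[num] = conteo.get(num, 0) + 1
--     # Phase 2: classify the distinct elements by their count.
--     una_vez = sum(1 for c in conteo.values() if c == 1)
--     conteo_repetidos = sum(1 for c in conteo.values() if c > 1)
--     return [una_vez, conteo_repetidos]
-- ===== Notes on version B (the rewrite author's own statement) =====
-- stated objective: faster
-- what changed: Replaces A's running seen/repeated list bookkeeping (with linear membership scans per element) by a two-phase build-a-frequency-table pass (dict counting) followed by a separate classification pass over the table's values.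
import Mathlib
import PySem

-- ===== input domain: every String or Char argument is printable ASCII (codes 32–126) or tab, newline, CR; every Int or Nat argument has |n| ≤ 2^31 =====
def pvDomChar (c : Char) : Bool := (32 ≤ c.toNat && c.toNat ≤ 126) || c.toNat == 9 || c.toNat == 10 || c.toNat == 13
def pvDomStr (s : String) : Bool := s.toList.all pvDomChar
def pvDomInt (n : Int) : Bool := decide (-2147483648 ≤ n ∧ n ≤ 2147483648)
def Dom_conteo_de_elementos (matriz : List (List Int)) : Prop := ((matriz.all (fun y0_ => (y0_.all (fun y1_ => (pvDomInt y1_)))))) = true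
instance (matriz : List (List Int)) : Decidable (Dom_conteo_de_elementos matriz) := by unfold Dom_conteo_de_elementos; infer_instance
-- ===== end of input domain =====

-- B replaces A's running vistos/repetidos list bookkeeping (a membership scan per element)
-- by a two-phase decomposition: build a complete frequency table first, then classify its values.

-- ===== PORT A =====
-- one iteration of A's inner loop body, on the state (vistos, repetidos)
def conteoStep (st : List Int × List Int) (num : Int) : List Int × List Int :=
  if st.1.contains num then
    if !(st.2.contains num) then (st.1, st.2 ++ [num]) else st
  else (st.1 ++ [num], st.2)

def conteo_de_elementos (matriz : List (List Int)) : List Int :=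
  let st := matriz.foldl (fun st fila => fila.foldl conteoStep st) ([], [])
  let una_vez := (st.1.filter (fun num => !(st.2.contains num))).length
  let conteo_repetidos := st.2.length
  [(una_vez : Int), (conteo_repetidos : Int)]

-- ===== PORT B =====
def conteo_de_elementos_alt (matriz : List (List Int)) : List Int :=
  let conteo : PySem.Dict Int Int := matriz.foldl (fun d fila =>
      fila.foldl (fun d num => d.insert num (d.getD num 0 + 1)) d) PySem.Dict.empty
  let una_vez := (conteo.values.filter (fun c => c == 1)).length
  let conteo_repetidos := (conteo.values.filter (fun c => decide (1 < c))).length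
  [(una_vez : Int), (conteo_repetidos : Int)]

-- ===== PRECONDITION & SPEC =====
def Spec_conteo_de_elementos (matriz : List (List Int)) (out : List Int) : Prop := out = conteo_de_elementos_alt matriz
instance (matriz : List (List Int)) (out : List Int) : Decidable (Spec_conteo_de_elementos matriz out) := by unfold Spec_conteo_de_elementos; infer_instance

-- ===== CLAIM (what is proved, stated in full; the proofs are below) =====
def Claim_equal_conteo_de_elementos : Prop := ∀ (matriz : List (List Int)), Dom_conteo_de_elementos matriz → Spec_conteo_de_elementos matriz (conteo_de_elementos matriz)

-- ===== LEMMAS AND PROOFS =====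

-- A's state after processing the flat element sequence l, starting from ([], []):
-- vistos is the ordered set of elements of l; repetidos is a duplicate-free list of
-- exactly the elements occurring at least twice in l.
theorem conteo_state (l : List Int) :
    (l.foldl conteoStep ([], [])).1 = PySem.Set.ofList l ∧
    (l.foldl conteoStep ([], [])).2.Nodup ∧
    (∀ x : Int, x ∈ (l.foldl conteoStep ([], [])).2 ↔ 2 ≤ l.count x) := by
  induction l using List.reverseRecOn with
  | nil => simp [PySem.Set.ofList]
  | append_singleton l a ih =>
    obtain ⟨h1, h2, h3⟩ := ih
    rw [List.foldl_append, List.foldl_cons, List.foldl_nil,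
      PySem.Set.ofList_append_singleton]
    have hcnt : ∀ x : Int, (l ++ [a]).count x = l.count x + if x = a then 1 else 0 := by
      intro x
      by_cases hx : x = a
      · subst hx; rw [List.count_append]; simp
      · rw [List.count_append]
        have : List.count x [a] = 0 := by
          rw [List.count_eq_zero]; simp [hx]
        simp [this, hx]
    generalize hst : l.foldl conteoStep ([], []) = st at h1 h2 h3 ⊢
    obtain ⟨v, r⟩ := st
    simp only at h1 h2 h3
    subst h1
    unfold conteoStep
    by_cases hv : a ∈ PySem.Set.ofList l
    · rw [if_pos (List.contains_iff_mem.2 hv)]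
      have hc1 : 1 ≤ l.count a :=
        List.count_pos_iff.mpr ((PySem.Set.mem_ofList l a).1 hv)
      rw [PySem.Set.add_of_mem hv]
      by_cases hr : a ∈ r
      · rw [if_neg (by simp [hr])]
        refine ⟨rfl, h2, fun x => ?_⟩
        rw [h3 x, hcnt x]
        by_cases hx : x = a
        · subst hx
          have := (h3 x).1 hr
          constructor <;> intro <;> omega
        · simp [hx]
      · rw [if_pos (by simp [hr])]
        refine ⟨rfl, List.Nodup.append h2 (List.nodup_singleton a) (by simp [hr]), fun x => ?_⟩
        rw [List.mem_append, List.mem_singleton, h3 x, hcnt x]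
        by_cases hx : x = a
        · subst hx
          refine ⟨fun _ => ?_, fun _ => Or.inr rfl⟩
          split_ifs with h
          · omega
          · exact absurd rfl h
        · simp [hx]
    · rw [if_neg (by simp [hv])]
      have hc0 : l.count a = 0 := by
        rw [List.count_eq_zero]
        exact fun hmem => hv ((PySem.Set.mem_ofList l a).2 hmem)
      rw [PySem.Set.add_of_not_mem hv]
      refine ⟨rfl, h2, fun x => ?_⟩
      rw [h3 x, hcnt x]
      by_cases hx : x = a
      · subst hx; simp [hc0]
      · simp [hx]

-- the values of Counter(l) are the counts of the distinct elements of l, in first-occurrence order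
theorem counter_values (l : List Int) :
    (PySem.Dict.counter l).values = (PySem.Set.ofList l).map (fun k => (l.count k : Int)) := by
  show ((PySem.Dict.counter l).items).map (·.2) = _
  rw [PySem.Dict.items_counter]
  simp [List.map_map]

theorem conteo_main (matriz : List (List Int)) :
    conteo_de_elementos matriz = conteo_de_elementos_alt matriz := by
  obtain ⟨h1, h2, h3⟩ := conteo_state matriz.flatten
  simp only [conteo_de_elementos, conteo_de_elementos_alt]
  rw [← List.foldl_flatten, ← List.foldl_flatten]
  simp only [PySem.Dict.foldl_insert_getD_add_one_eq_counter]
  rw [counter_values, h1,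
    List.filter_map, List.filter_map, List.length_map, List.length_map]
  have huna : (PySem.Set.ofList matriz.flatten).filter
        (fun num => !((matriz.flatten.foldl conteoStep ([], [])).2.contains num))
      = (PySem.Set.ofList matriz.flatten).filter
        ((fun c => c == 1) ∘ fun k => ((matriz.flatten.count k : Int))) := by
    apply List.filter_congr
    intro x hx
    have hmem : x ∈ matriz.flatten := (PySem.Set.mem_ofList _ x).1 hx
    have hpos : 1 ≤ matriz.flatten.count x := List.count_pos_iff.mpr hmem
    by_cases h2c : 2 ≤ matriz.flatten.count x
    · have hxr : x ∈ (matriz.flatten.foldl conteoStep ([], [])).2 := (h3 x).2 h2c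
      have hne : ((matriz.flatten.count x : Int) == 1) = false := by
        simp; omega
      simp [hxr, hne, Function.comp]
    · have hxr : x ∉ (matriz.flatten.foldl conteoStep ([], [])).2 :=
        fun h => h2c ((h3 x).1 h)
      have hc : matriz.flatten.count x = 1 := by omega
      simp [hxr, hc, Function.comp]
  have hrep : (matriz.flatten.foldl conteoStep ([], [])).2.Perm
      ((PySem.Set.ofList matriz.flatten).filter
        ((fun c => decide (1 < c)) ∘ fun k => ((matriz.flatten.count k : Int)))) := by
    rw [List.perm_ext_iff_of_nodup h2 (List.Nodup.filter _ (PySem.Set.nodup_ofList _))]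
    intro x
    rw [List.mem_filter, h3 x, PySem.Set.mem_ofList]
    constructor
    · intro h
      refine ⟨List.count_pos_iff.mp (by omega), ?_⟩
      simp [Function.comp]
      omega
    · rintro ⟨-, h⟩
      simp [Function.comp] at h
      omega
  rw [huna, hrep.length_eq]

-- ===== VERDICT (by name: the statement is the Claim_ definition above) =====
theorem conteo_de_elementos_spec : Claim_equal_conteo_de_elementos :=
  fun matriz _ => conteo_main matriz
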